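-- pv_equiv track=rewrite | github.com/katton3104/dc4-client | src/mixed_doubles/CurlFighter-01/CurlFighter-01.py | resolve_display_end_count
-- ===== SOURCE A (Python) =====
-- def resolve_display_end_count(team0_scores, team1_scores, regulation_ends=8):
--     available_ends = min(len(team0_scores), len(team1_scores))
--     if available_ends <= regulation_ends:
--         return available_ends
--
--     cum0 = 0
--     cum1 = 0
--     for i in range(available_ends):
--         cum0 += team0_scores[i]
--         cum1 += team1_scores[i]
--         if i + 1 < regulation_ends:
--             continue
--         if cum0 != cum1:
--             return i + 1
--
--     return available_ends
-- ===== SOURCE B (Python) =====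
-- def resolve_display_end_count(team0_scores, team1_scores, regulation_ends=8):
--     available_ends = min(len(team0_scores), len(team1_scores))
--     if available_ends <= regulation_ends:
--         return available_ends
--
--     # Pass 1: table of cumulative score differences per end (diffs[e-1] = cum0-cum1 after end e).
--     diffs = []
--     total = 0
--     for a, b in zip(team0_scores, team1_scores):
--         total += a - b
--         diffs.append(total)
--
--     # Pass 2: first end at or after regulation whose cumulative scores differ.
--     for end in range(max(regulation_ends, 1), available_ends + 1):
--         if diffs[end - 1] != 0:
--             return end
--     return available_ends
-- ===== Notes on version B (the rewrite author's own statement) =====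
-- stated objective: alternative
-- what changed: Replaced A's single index loop carrying two running totals with a skip branch by two passes: first build a table of cumulative score differences over zip(team0,team1), then search ends from max(regulation_ends,1) upward for the first nonzero difference.
import Mathlib
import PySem

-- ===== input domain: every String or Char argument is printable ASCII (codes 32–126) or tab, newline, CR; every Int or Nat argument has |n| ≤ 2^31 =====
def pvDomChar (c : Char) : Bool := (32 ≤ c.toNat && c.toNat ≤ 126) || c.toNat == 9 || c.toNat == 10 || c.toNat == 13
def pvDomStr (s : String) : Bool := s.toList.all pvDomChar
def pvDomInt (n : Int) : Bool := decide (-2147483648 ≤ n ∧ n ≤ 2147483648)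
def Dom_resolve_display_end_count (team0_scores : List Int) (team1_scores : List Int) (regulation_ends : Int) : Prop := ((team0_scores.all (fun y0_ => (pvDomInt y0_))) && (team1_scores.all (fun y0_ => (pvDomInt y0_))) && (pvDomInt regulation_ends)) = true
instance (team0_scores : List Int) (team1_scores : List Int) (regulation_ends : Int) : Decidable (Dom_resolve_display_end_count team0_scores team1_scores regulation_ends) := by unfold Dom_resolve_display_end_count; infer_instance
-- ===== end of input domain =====

-- B restructures A's single accumulator loop into two passes (prefix-difference table, then a search from max(regulation_ends,1)); same O(n) cost.

-- ===== PORT A =====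
-- the for-loop over range(available_ends) with running cum0/cum1 and early return;
-- indexing team0_scores[i]/team1_scores[i] is always in range (i < n ≤ both lengths), so getD is exact.
def pvALoop (t0 t1 : List Int) (reg : Int) (n : Nat) (i : Nat) (cum0 cum1 : Int) : Int :=
  if h : i < n then
    let c0 := cum0 + t0.getD i 0
    let c1 := cum1 + t1.getD i 0
    if ((i : Int) + 1) < reg then
      pvALoop t0 t1 reg n (i + 1) c0 c1
    else if c0 ≠ c1 then ((i : Int) + 1)
    else pvALoop t0 t1 reg n (i + 1) c0 c1
  else (n : Int)
termination_by n - i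

def resolve_display_end_count (team0_scores : List Int) (team1_scores : List Int) (regulation_ends : Int) : Int :=
  let available_ends : Nat := min team0_scores.length team1_scores.length
  if (available_ends : Int) ≤ regulation_ends then (available_ends : Int)
  else pvALoop team0_scores team1_scores regulation_ends available_ends 0 0 0

-- ===== PORT B =====
-- pass 1: prefix sums of per-end differences over zip(team0, team1)
def pvBDiffs (pairs : List (Int × Int)) (total : Int) : List Int :=
  match pairs with
  | [] => []
  | (a, b) :: rest =>
    let t := total + a - b
    t :: pvBDiffs rest t

-- pass 2: for end in range(start, n+1): if diffs[end-1] != 0: return end  (index always in range, getD exact)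
def pvBSearch (diffs : List Int) (n : Nat) (e : Nat) : Int :=
  if h : e ≤ n then
    if diffs.getD (e - 1) 0 ≠ 0 then (e : Int)
    else pvBSearch diffs n (e + 1)
  else (n : Int)
termination_by n + 1 - e

def resolve_display_end_count_alt (team0_scores : List Int) (team1_scores : List Int) (regulation_ends : Int) : Int :=
  let available_ends : Nat := min team0_scores.length team1_scores.length
  if (available_ends : Int) ≤ regulation_ends then (available_ends : Int)
  else
    let diffs := pvBDiffs (team0_scores.zip team1_scores) 0
    pvBSearch diffs available_ends (max regulation_ends 1).toNat

-- ===== PRECONDITION & SPEC =====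
def Spec_resolve_display_end_count (team0_scores : List Int) (team1_scores : List Int) (regulation_ends : Int) (out : Int) : Prop := out = resolve_display_end_count_alt team0_scores team1_scores regulation_ends
instance (team0_scores : List Int) (team1_scores : List Int) (regulation_ends : Int) (out : Int) : Decidable (Spec_resolve_display_end_count team0_scores team1_scores regulation_ends out) := by unfold Spec_resolve_display_end_count; infer_instance

-- ===== CLAIM (what is proved, stated in full; the proofs are below) =====
def Claim_equal_resolve_display_end_count : Prop := ∀ (team0_scores : List Int) (team1_scores : List Int) (regulation_ends : Int), Dom_resolve_display_end_count team0_scores team1_scores regulation_ends → Spec_resolve_display_end_count team0_scores team1_scores regulation_ends (resolve_display_end_count team0_scores team1_scores regulation_ends)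

-- ===== LEMMAS AND PROOFS =====

-- cumulative difference after the first k ends
def pvDp : List (Int × Int) → Nat → Int
  | _, 0 => 0
  | [], _ + 1 => 0
  | p :: rest, k + 1 => (p.1 - p.2) + pvDp rest k

theorem pvBDiffs_getD (pairs : List (Int × Int)) (total : Int) (k : Nat) (hk : k < pairs.length) :
    (pvBDiffs pairs total).getD k 0 = total + pvDp pairs (k + 1) := by
  induction pairs generalizing total k with
  | nil => simp at hk
  | cons p rest ih =>
    cases k with
    | zero => simp [pvBDiffs, pvDp]; ring
    | succ k =>
      simp only [pvBDiffs, List.getD_cons_succ]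
      rw [ih _ k (by simpa using hk)]
      simp [pvDp]; ring

theorem pvDp_succ (pairs : List (Int × Int)) (i : Nat) (hi : i < pairs.length) :
    pvDp pairs (i + 1) = pvDp pairs i + (pairs.getD i (0, 0)).1 - (pairs.getD i (0, 0)).2 := by
  induction pairs generalizing i with
  | nil => simp at hi
  | cons p rest ih =>
    cases i with
    | zero => simp [pvDp]
    | succ i =>
      simp only [pvDp, List.getD_cons_succ]
      rw [ih i (by simpa using hi)]
      ring

theorem pvALoop_eq (t0 t1 : List Int) (reg : Int) (n i : Nat) (c0 c1 : Int)
    (hn0 : n ≤ t0.length) (hn1 : n ≤ t1.length) (hi : i ≤ n)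
    (hc : c0 - c1 = pvDp (t0.zip t1) i) :
    pvALoop t0 t1 reg n i c0 c1 =
      pvBSearch (pvBDiffs (t0.zip t1) 0) n (max (max reg 1).toNat (i + 1)) := by
  by_cases h : i < n
  · have hzl : (t0.zip t1).length = min t0.length t1.length := List.length_zip
    have hiz : i < (t0.zip t1).length := by omega
    have hget : (t0.zip t1).getD i (0, 0) = (t0.getD i 0, t1.getD i 0) := by
      rw [List.getD_eq_getElem _ _ hiz, List.getD_eq_getElem _ _ (by omega : i < t0.length),
        List.getD_eq_getElem _ _ (by omega : i < t1.length)]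
      simp
    have hstep : (c0 + t0.getD i 0) - (c1 + t1.getD i 0) = pvDp (t0.zip t1) (i + 1) := by
      rw [pvDp_succ _ i hiz, hget, ← hc]; ring
    rw [pvALoop]
    simp only [dif_pos h]
    by_cases hr : ((i : Int) + 1) < reg
    · -- skip phase: i+2 ≤ start, so the search pointer is unchanged
      have hmax : max (max reg 1).toNat (i + 1 + 1) = max (max reg 1).toNat (i + 1) := by
        omega
      rw [if_pos hr, pvALoop_eq t0 t1 reg n (i + 1) _ _ hn0 hn1 (by omega) hstep, hmax]
    · -- check phase: the pointer is exactly i+1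
      have hm : max (max reg 1).toNat (i + 1) = i + 1 := by omega
      have hd : (pvBDiffs (t0.zip t1) 0).getD (i + 1 - 1) 0 = pvDp (t0.zip t1) (i + 1) := by
        simpa using pvBDiffs_getD (t0.zip t1) 0 i hiz
      rw [if_neg hr, hm]
      by_cases hne : (c0 + t0.getD i 0) ≠ (c1 + t1.getD i 0)
      · rw [if_pos hne, pvBSearch, dif_pos (by omega : i + 1 ≤ n),
          if_pos (by rw [hd, ← hstep]; omega)]
        omega
      · rw [if_neg hne, pvBSearch, dif_pos (by omega : i + 1 ≤ n),
          if_neg (by rw [hd, ← hstep]; omega)]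
        rw [pvALoop_eq t0 t1 reg n (i + 1) _ _ hn0 hn1 (by omega) hstep]
        congr 1
        omega
  · have hin : i = n := by omega
    rw [pvALoop, dif_neg h, pvBSearch, dif_neg (by omega)]
termination_by n - i

-- ===== VERDICT (by name: the statement is the Claim_ definition above) =====
theorem resolve_display_end_count_spec : Claim_equal_resolve_display_end_count := by
  intro t0 t1 reg _
  unfold Spec_resolve_display_end_count resolve_display_end_count resolve_display_end_count_alt
  by_cases h : ((min t0.length t1.length : Nat) : Int) ≤ reg
  · simp only [if_pos h]
  · simp only [if_neg h]
    rw [pvALoop_eq t0 t1 reg (min t0.length t1.length) 0 0 0 (by omega) (by omega)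
      (by omega) (by simp [pvDp])]
    congr 1
    omega
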